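-- pv_equiv track=rewrite | github.com/ryandkuster/squeegee | squeegee.py | last_common_node
-- ===== SOURCE A (Python) =====
-- def last_common_node(var_ls, traversal):
--     """
--     Search for nodes found in all allele traversal paths. This needs to
--     look from the end of the list, as first node will at times be a
--     common point in the graph, regardless of if the ref/alt begin there.
--     Use the shortest allele path.
--     Return index of common final node (default -1 is last node).
--     """
--     trav_ls = [i[1:].split(">") for i in traversal]
--     short_path = len(trav_ls[trav_ls.index(min(trav_ls, key=len))])
--
--     for i in range(-short_path, -1):
--         node_ls = []
--         for j in trav_ls:
--             node_ls += j[i:]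
--         if len(set(node_ls)) == -i:
--             return i
--
--     return -1
-- ===== SOURCE B (Python) =====
-- def last_common_node(var_ls, traversal):
--     """Single ascending pass: grow one shared set of suffix nodes, adding each
--     path's k-th-from-end node once per length k, and keep the largest k whose
--     distinct-node count equals k."""
--     trav_ls = [t[1:].split(">") for t in traversal]
--     short_path = min(len(p) for p in trav_ls)
--     seen = set()
--     best = 1
--     for k in range(1, short_path + 1):
--         for p in trav_ls:
--             seen.add(p[-k])
--         if k >= 2 and len(seen) == k:
--             best = k
--     return -best
-- ===== Notes on version B (the rewrite author's own statement) =====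
-- stated objective: alternative
-- what changed: Instead of rebuilding the concatenated suffix list and its set from scratch for every candidate suffix length (descending scan, first hit wins), B makes one ascending pass that grows a single shared set by one node per path per length and keeps the largest qualifying length.
import Mathlib
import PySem

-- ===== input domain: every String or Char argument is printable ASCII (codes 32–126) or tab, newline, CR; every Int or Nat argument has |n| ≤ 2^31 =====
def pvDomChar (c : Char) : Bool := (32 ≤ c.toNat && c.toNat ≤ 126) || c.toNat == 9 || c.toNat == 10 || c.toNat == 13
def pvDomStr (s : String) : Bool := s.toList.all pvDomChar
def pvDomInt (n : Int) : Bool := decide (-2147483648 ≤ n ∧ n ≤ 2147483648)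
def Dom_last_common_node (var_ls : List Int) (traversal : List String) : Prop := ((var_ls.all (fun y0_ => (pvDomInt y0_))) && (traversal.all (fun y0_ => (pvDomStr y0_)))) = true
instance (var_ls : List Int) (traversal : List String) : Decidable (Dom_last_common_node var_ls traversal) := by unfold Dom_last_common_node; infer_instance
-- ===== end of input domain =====

-- B replaces A's per-length suffix-set rebuild (descending scan, first hit) with one ascending
-- pass growing a single shared set and tracking the largest qualifying length (alternative algorithm, similar cost).


-- ===== PORT A =====
-- 'for i in range(-short_path, -1): node_ls = []; for j in trav_ls: node_ls += j[i:]; if …: return i'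
def lcnScan (trav_ls : List (List String)) : List Int → Int
  | [] => -1
  | i :: rest =>
    let node_ls := trav_ls.foldl (fun acc j => acc ++ PySem.List.slice j (some i) none) []
    if ((PySem.Set.ofList node_ls).length : Int) = -i then i else lcnScan trav_ls rest

def last_common_node (var_ls : List Int) (traversal : List String) : Int :=
  let trav_ls := traversal.map (fun s => (PySem.Str.split? (PySem.Str.slice s (some 1) none) ">").getD [])
  match PySem.List.min? trav_ls (fun p => p.length) with
  | none => -1  -- unreachable under Pre_: Python's min raises ValueError on empty traversal
  | some m =>
    match PySem.List.index? trav_ls m with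
    | none => -1  -- unreachable: the minimum is a member of the list
    | some idx =>
      let short_path : Int := ((trav_ls.getD idx []).length : Int)
      lcnScan trav_ls (PySem.List.pyRange (-short_path) (-1) 1)

-- ===== PORT B =====
def last_common_node_alt (var_ls : List Int) (traversal : List String) : Int :=
  let trav_ls := traversal.map (fun t => (PySem.Str.split? (PySem.Str.slice t (some 1) none) ">").getD [])
  match PySem.List.min? (trav_ls.map (fun p => (p.length : Int))) (fun x => x) with
  | none => -1  -- unreachable under Pre_: Python's min raises ValueError on empty traversal
  | some short_path =>
    -(((PySem.List.pyRange 1 (short_path + 1) 1).foldl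
      (fun (st : PySem.Set String × Int) k =>
        let seen := trav_ls.foldl (fun s p => PySem.Set.add s (PySem.List.pyGetD p (-k) "")) st.1
        let best := if 2 ≤ k ∧ ((seen.length : Int) = k) then k else st.2
        (seen, best)) (PySem.Set.empty, 1)).2)

-- ===== PRECONDITION & SPEC =====
-- Pre_ excludes only the empty traversal list, on which A's min() raises ValueError.
def Pre_last_common_node (var_ls : List Int) (traversal : List String) : Prop := traversal ≠ []
instance (var_ls : List Int) (traversal : List String) : Decidable (Pre_last_common_node var_ls traversal) := by unfold Pre_last_common_node; infer_instance
def pvWitness_last_common_node : List Int × List String := ([], [">x>y>z", ">w>y>z"])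

def Spec_last_common_node (var_ls : List Int) (traversal : List String) (out : Int) : Prop := out = last_common_node_alt var_ls traversal
instance (var_ls : List Int) (traversal : List String) (out : Int) : Decidable (Spec_last_common_node var_ls traversal out) := by unfold Spec_last_common_node; infer_instance

-- ===== CLAIM (what is proved, stated in full; the proofs are below) =====
def Claim_equal_last_common_node : Prop := ∀ (var_ls : List Int) (traversal : List String), Dom_last_common_node var_ls traversal → Pre_last_common_node var_ls traversal → Spec_last_common_node var_ls traversal (last_common_node var_ls traversal)

-- ===== LEMMAS AND PROOFS =====

-- A's qualifying test at suffix length k, as a Bool.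
def lcnQb (tl : List (List String)) (k : Nat) : Bool :=
  ((PySem.Set.ofList (tl.foldl (fun acc j => acc ++ PySem.List.slice j (some (-(k:Int))) none) [])).length : Int) == (k : Int)

-- the largest k in [2, s] with lcnQb, else 1, as the value of A's descending first-hit scan / B's ascending update chain
def lcnAfold (tl : List (List String)) : Nat → Int
  | 0 => 1
  | (s+1) => if 2 ≤ ((s:Int)+1) ∧ lcnQb tl (s+1) then ((s:Int)+1) else lcnAfold tl s

theorem lcnScan_eq_afold (tl : List (List String)) (s : Nat) :
    lcnScan tl (PySem.List.pyRange (-(s:Int)) (-1) 1) = - lcnAfold tl s := by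
  induction s with
  | zero => rw [PySem.List.pyRange_one_eq_nil (by norm_num)]; simp [lcnScan, lcnAfold]
  | succ n ih =>
    by_cases hn : n = 0
    · subst hn
      rw [PySem.List.pyRange_one_eq_nil (by norm_num)]
      simp [lcnScan, lcnAfold, lcnQb]
    · have h1 : (-(((n+1:Nat)):Int)) < -1 := by push_cast; omega
      rw [PySem.List.pyRange_one_cons h1]
      have h2 : (-(((n+1:Nat)):Int)) + 1 = -(n:Int) := by push_cast; ring
      rw [lcnScan, h2, ih]
      simp only [lcnAfold, lcnQb]
      have h3 : (2:Int) ≤ (n:Int) + 1 := by omega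
      simp only [h3, true_and, neg_neg, beq_iff_eq]
      push_cast
      split_ifs with h4 <;> simp

theorem nodup_foldl_add {α : Type} [BEq α] [LawfulBEq α] {β : Type} (l : List β) (f : β → α)
    (s0 : List α) (h : s0.Nodup) :
    (l.foldl (fun s b => PySem.Set.add s (f b)) s0).Nodup := by
  induction l generalizing s0 with
  | nil => exact h
  | cons x xs ih => exact ih _ (PySem.Set.nodup_add _ _ h)

theorem suffix_mem_iff (p : List String) (k : Nat) (hk : 0 < k) (hlen : k ≤ p.length) (y : String) :
    (y ∈ PySem.List.slice p (some (-(k:Int))) none ↔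
      ∃ j : Nat, 1 ≤ j ∧ j ≤ k ∧ y = PySem.List.pyGetD p (-(j:Int)) "") := by
  rw [PySem.List.slice_from_neg_natCast p k hk]
  constructor
  · intro hy
    obtain ⟨i, hi, hget⟩ := List.getElem_of_mem hy
    rw [List.getElem_drop] at hget
    rw [List.length_drop] at hi
    refine ⟨p.length - (p.length - k + i), by omega, by omega, ?_⟩
    rw [PySem.List.pyGetD_neg_natCast p _ "" (by omega) (by omega)]
    rw [← hget]
    congr 1
    omega
  · rintro ⟨j, hj1, hjk, rfl⟩
    rw [PySem.List.pyGetD_neg_natCast p j "" (by omega) (by omega)]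
    have : p[p.length - j] = (p.drop (p.length - k))[k - j]'(by rw [List.length_drop]; omega) := by
      rw [List.getElem_drop]; congr 1; omega
    rw [this]
    exact List.getElem_mem _

theorem seen_length_eq (tl : List (List String)) (k : Nat) (hk0 : 0 < k)
    (hb : ∀ p ∈ tl, k ≤ p.length) (seen : List String) (hnd : seen.Nodup)
    (hmem : ∀ y, y ∈ seen ↔ ∃ p ∈ tl, ∃ j : Nat, 1 ≤ j ∧ j ≤ k ∧ y = PySem.List.pyGetD p (-(j:Int)) "") :
    (((seen.length : Int) = (k:Int)) ↔ lcnQb tl k = true) := by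
  have hperm : seen.Perm (PySem.Set.ofList (tl.foldl (fun acc j => acc ++ PySem.List.slice j (some (-(k:Int))) none) [])) := by
    rw [List.perm_ext_iff_of_nodup hnd (PySem.Set.nodup_ofList _)]
    intro y
    rw [hmem y, PySem.Set.mem_ofList, PySem.List.foldl_append_eq_flatMap, List.nil_append,
      List.mem_flatMap]
    constructor
    · rintro ⟨p, hp, hj⟩
      exact ⟨p, hp, (suffix_mem_iff p k hk0 (hb p hp) y).2 hj⟩
    · rintro ⟨p, hp, hy⟩
      exact ⟨p, hp, (suffix_mem_iff p k hk0 (hb p hp) y).1 hy⟩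
  rw [lcnQb, beq_iff_eq, ← hperm.length_eq]

theorem getD_index? (tl : List (List String)) (m : List String) (idx : Nat)
    (h : PySem.List.index? tl m = some idx) : tl.getD idx [] = m := by
  rw [PySem.List.index?_eq_idxOf?] at h
  obtain ⟨h1, h2, _⟩ := List.idxOf?_eq_some_iff.mp h
  rw [List.getD_eq_getElem tl [] h1, h2]

theorem bfold_invariant (tl : List (List String)) (spN : Nat)
    (hb : ∀ p ∈ tl, spN ≤ p.length) (s : Nat) (hs : s ≤ spN) :
    (∀ y, y ∈ ((PySem.List.pyRange 1 ((s:Int)+1) 1).foldl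
        (fun (st : PySem.Set String × Int) k =>
          let seen := tl.foldl (fun s p => PySem.Set.add s (PySem.List.pyGetD p (-k) "")) st.1
          let best := if 2 ≤ k ∧ ((seen.length : Int) = k) then k else st.2
          (seen, best)) (PySem.Set.empty, 1)).1 ↔
        ∃ p ∈ tl, ∃ j : Nat, 1 ≤ j ∧ j ≤ s ∧ y = PySem.List.pyGetD p (-(j:Int)) "") ∧
    ((PySem.List.pyRange 1 ((s:Int)+1) 1).foldl
        (fun (st : PySem.Set String × Int) k =>
          let seen := tl.foldl (fun s p => PySem.Set.add s (PySem.List.pyGetD p (-k) "")) st.1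
          let best := if 2 ≤ k ∧ ((seen.length : Int) = k) then k else st.2
          (seen, best)) (PySem.Set.empty, 1)).1.Nodup ∧
    ((PySem.List.pyRange 1 ((s:Int)+1) 1).foldl
        (fun (st : PySem.Set String × Int) k =>
          let seen := tl.foldl (fun s p => PySem.Set.add s (PySem.List.pyGetD p (-k) "")) st.1
          let best := if 2 ≤ k ∧ ((seen.length : Int) = k) then k else st.2
          (seen, best)) (PySem.Set.empty, 1)).2 = lcnAfold tl s := by
  induction s with
  | zero =>
    rw [show ((0:Nat):Int) + 1 = 1 by norm_num, PySem.List.pyRange_one_eq_nil (by norm_num)]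
    refine ⟨fun y => ?_, List.nodup_nil, rfl⟩
    simp [PySem.Set.empty]
  | succ n ih =>
    obtain ⟨ihm, ihn, ihb⟩ := ih (by omega)
    rw [show (((n+1:Nat)):Int) + 1 = ((n:Int)+1)+1 by push_cast; ring,
      PySem.List.pyRange_one_succ_right (by omega), List.foldl_append, List.foldl_cons,
      List.foldl_nil]
    set st := ((PySem.List.pyRange 1 ((n:Int)+1) 1).foldl
        (fun (st : PySem.Set String × Int) k =>
          let seen := tl.foldl (fun s p => PySem.Set.add s (PySem.List.pyGetD p (-k) "")) st.1
          let best := if 2 ≤ k ∧ ((seen.length : Int) = k) then k else st.2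
          (seen, best)) (PySem.Set.empty, 1)) with hst
    simp only []
    have hmem' : ∀ y, y ∈ tl.foldl (fun s p => PySem.Set.add s (PySem.List.pyGetD p (-((n:Int)+1)) "")) st.1 ↔
        ∃ p ∈ tl, ∃ j : Nat, 1 ≤ j ∧ j ≤ n+1 ∧ y = PySem.List.pyGetD p (-(j:Int)) "" := by
      intro y
      rw [PySem.Set.mem_foldl_add]
      constructor
      · rintro (hy | ⟨p, hp, rfl⟩)
        · obtain ⟨p, hp, j, h1, h2, h3⟩ := (ihm y).1 hy
          exact ⟨p, hp, j, h1, by omega, h3⟩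
        · exact ⟨p, hp, n+1, by omega, le_refl _, by push_cast; rfl⟩
      · rintro ⟨p, hp, j, h1, h2, rfl⟩
        by_cases hj : j ≤ n
        · exact Or.inl ((ihm _).2 ⟨p, hp, j, h1, hj, rfl⟩)
        · have : j = n+1 := by omega
          subst this
          exact Or.inr ⟨p, hp, by push_cast; rfl⟩
    have hnd' : (tl.foldl (fun s p => PySem.Set.add s (PySem.List.pyGetD p (-((n:Int)+1)) "")) st.1).Nodup := by
      exact nodup_foldl_add tl _ st.1 ihn
    refine ⟨hmem', hnd', ?_⟩
    have hlen := seen_length_eq tl (n+1) (by omega) (fun p hp => le_trans hs (hb p hp)) _ hnd'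
      (by intro y; rw [hmem' y])
    rw [lcnAfold, ihb]
    have hc : (((tl.foldl (fun s p => PySem.Set.add s (PySem.List.pyGetD p (-((n:Int)+1)) "")) st.1).length : Int) = ((n:Int)+1)) ↔ (lcnQb tl (n+1) = true) := by
      have h2 := hlen
      push_cast at h2
      exact h2
    rw [if_congr (and_congr_right (fun _ => hc)) rfl rfl]

-- ===== VERDICT (by name: the statement is the Claim_ definition above) =====
theorem last_common_node_spec : Claim_equal_last_common_node := by
  intro var_ls traversal _hdom hpre
  have hpre' : traversal ≠ [] := hpre
  unfold Spec_last_common_node last_common_node last_common_node_alt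
  simp only []
  set tl := traversal.map (fun s => (PySem.Str.split? (PySem.Str.slice s (some 1) none) ">").getD []) with htl
  have htlne : tl ≠ [] := by
    rw [htl, Ne, List.map_eq_nil_iff]
    exact hpre'
  cases hA : PySem.List.min? tl (fun p => p.length) with
  | none => exact absurd ((PySem.List.min?_eq_none_iff _ _).mp hA) htlne
  | some m =>
    cases hI : PySem.List.index? tl m with
    | none =>
      have := (PySem.List.index?_isSome_iff tl m).mpr (PySem.List.min?_mem hA)
      rw [hI] at this
      simp at this
    | some idx =>
      cases hB : PySem.List.min? (tl.map (fun p => (p.length : Int))) (fun x => x) with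
      | none =>
        have := (PySem.List.min?_eq_none_iff _ _).mp hB
        rw [List.map_eq_nil_iff] at this
        exact absurd this htlne
      | some v =>
        have hgd : tl.getD idx [] = m := getD_index? tl m idx hI
        have hv : v = (m.length : Int) := by
          obtain ⟨p, hp, hpv⟩ := List.mem_map.mp (PySem.List.min?_mem hB)
          have h1 := PySem.List.min?_isMin hA p hp
          have h2 := PySem.List.min?_isMin hB ((m.length : Int))
            (List.mem_map_of_mem (PySem.List.min?_mem hA))
          simp only at h1 h2
          omega
        have hb : ∀ p ∈ tl, m.length ≤ p.length := fun p hp => PySem.List.min?_isMin hA p hp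
        simp only [hI]
        rw [hgd, hv]
        obtain ⟨_, _, hbest⟩ := bfold_invariant tl m.length hb m.length (le_refl _)
        rw [hbest, lcnScan_eq_afold tl m.length]
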